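-- pv_equiv track=rewrite | github.com/dcowgill/codejunk | CodeEval/string_substitution/strsub.py | substitute_chain
-- ===== SOURCE A (Python) =====
-- def substitute_chain(chain, pairs):
--     if not pairs:
--         return chain
--     newchain = []
--     for link in chain:
--         s, modified = link
--         if not modified:
--             newchain.extend(substitute(link[0], pairs[0]))
--         else:
--             newchain.append(link)
--     return substitute_chain(newchain, pairs[1:])
--
-- def substitute(value, replacement):
--     s, t = replacement
--     chain = []
--     while value:
--         i = value.find(s)
--         if i < 0:
--             chain.append([value, False])
--             return chain
--         if i > 0:
--             chain.append([value[:i], False])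
--         chain.append([t, True])
--         value = value[i + len(s):]
--     return chain
-- ===== SOURCE B (Python) =====
-- def substitute_chain(chain, pairs):
--     for s, t in pairs:
--         newchain = []
--         for link in chain:
--             if link[1]:
--                 newchain.append(link)
--             else:
--                 parts = link[0].split(s)
--                 for part in parts[:-1]:
--                     if part:
--                         newchain.append([part, False])
--                     newchain.append([t, True])
--                 if parts[-1]:
--                     newchain.append([parts[-1], False])
--         chain = newchain
--     return chain
-- ===== Notes on version B (the rewrite author's own statement) =====
-- stated objective: alternative
-- what changed: A's hand-written leftmost-find scanning loop (substitute) is replaced by the standard library: each unmodified link is segmented with str.split(s) and the parts are interleaved with [t, True] markers, skipping empty parts; the recursion over pairs becomes an iterative per-pair rebuild loop.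
-- outside the precondition, e.g. on substitute_chain([('x', True), ('', False)], [('', 'y')]): A returns [('x', True)], B raises ValueError; on substitute_chain([('ab', False)], [('ab', 'c'), ('', 'd')]): A returns [('c', True)], B returns [('c', True)]
import Mathlib
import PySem

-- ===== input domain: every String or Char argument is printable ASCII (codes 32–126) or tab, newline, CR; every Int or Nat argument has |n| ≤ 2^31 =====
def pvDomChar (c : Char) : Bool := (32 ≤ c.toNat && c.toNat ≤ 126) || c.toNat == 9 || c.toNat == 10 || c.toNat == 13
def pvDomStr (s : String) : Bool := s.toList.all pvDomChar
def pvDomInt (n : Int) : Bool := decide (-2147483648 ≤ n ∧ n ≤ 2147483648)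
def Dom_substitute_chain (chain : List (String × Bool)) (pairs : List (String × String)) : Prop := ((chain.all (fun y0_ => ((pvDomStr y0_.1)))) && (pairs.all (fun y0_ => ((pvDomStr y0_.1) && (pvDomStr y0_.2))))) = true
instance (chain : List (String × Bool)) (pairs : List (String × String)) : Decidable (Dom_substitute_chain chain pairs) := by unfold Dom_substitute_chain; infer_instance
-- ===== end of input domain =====

-- B replaces A's hand-written leftmost-find scanning loop by the standard library's
-- str.split segmentation with an interleaving pass, and A's recursion over pairs by an
-- iterative per-pair rebuild (objective: alternative).

-- ===== PORT A =====
-- the 'while value' loop of substitute; fuel = |value|+1 suffices because (under Pre_,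
-- s ≠ []) every iteration consumes i + |s| ≥ 1 characters of value or returns
def subLoopA (s t : List Char) (value : List Char) (fuel : Nat) : List (String × Bool) :=
  match fuel with
  | 0 => []
  | fuel + 1 =>
    if value = [] then []
    else
      let i := PySem.Chars.find value s
      if i < 0 then [(String.ofList value, false)]
      else
        (if i > 0 then [(String.ofList (PySem.List.slice value none (some i)), false)] else [])
        ++ [(String.ofList t, true)]
        ++ subLoopA s t (PySem.List.slice value (some (i + s.length)) none) fuel

def substituteA (value : String) (repl : String × String) : List (String × Bool) :=
  subLoopA repl.1.toList repl.2.toList value.toList (value.toList.length + 1)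

def substitute_chain (chain : List (String × Bool)) (pairs : List (String × String)) : List (String × Bool) :=
  match pairs with
  | [] => chain
  | p :: rest =>
    let newchain := chain.foldl
      (fun acc link => if !link.2 then acc ++ substituteA link.1 p else acc ++ [link]) []
    substitute_chain newchain rest

-- ===== PORT B =====
-- Source B: one pass per pair; each unmodified link is segmented with link[0].split(s)
-- (PySem.Chars.splitOn) and the parts are interleaved with (t, true) markers, skipping
-- empty parts; parts[-1] is total here since split never returns [] (none case unreachable).
def substitute_chain_alt (chain : List (String × Bool)) (pairs : List (String × String)) : List (String × Bool) :=
  pairs.foldl (fun chain p =>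
    chain.foldl (fun newchain link =>
      if link.2 then newchain ++ [link]
      else
        let parts := PySem.Chars.splitOn link.1.toList p.1.toList
        let newchain := parts.dropLast.foldl
          (fun nc part => (if part.isEmpty then nc else nc ++ [(String.ofList part, false)]) ++ [(p.2, true)]) newchain
        match parts.getLast? with
        | some last => if last.isEmpty then newchain else newchain ++ [(String.ofList last, false)]
        | none => newchain) []) chain

-- ===== PRECONDITION & SPEC =====
-- Pre_ excludes inputs that put an empty search string in some pair in front of a chain with
-- an unmodified link: there A's substitute loops forever on any nonempty unmodified value (on the
-- few such chains it still returns, B's str.split('') raises ValueError, so they stay excluded).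
def Pre_substitute_chain (chain : List (String × Bool)) (pairs : List (String × String)) : Prop :=
  (∀ p ∈ pairs, p.1 ≠ "") ∨ (∀ l ∈ chain, l.2 = true)
instance (chain : List (String × Bool)) (pairs : List (String × String)) : Decidable (Pre_substitute_chain chain pairs) := by unfold Pre_substitute_chain; infer_instance

def pvWitness_substitute_chain : (List (String × Bool)) × (List (String × String)) :=
  ([("hello world", false), ("org", true)], [("o", "0"), ("l", "L")])

def Spec_substitute_chain (chain : List (String × Bool)) (pairs : List (String × String)) (out : List (String × Bool)) : Prop := out = substitute_chain_alt chain pairs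
instance (chain : List (String × Bool)) (pairs : List (String × String)) (out : List (String × Bool)) : Decidable (Spec_substitute_chain chain pairs out) := by unfold Spec_substitute_chain; infer_instance

-- ===== CLAIM (what is proved, stated in full; the proofs are below) =====
def Claim_equal_substitute_chain : Prop := ∀ (chain : List (String × Bool)) (pairs : List (String × String)), Dom_substitute_chain chain pairs → Pre_substitute_chain chain pairs → Spec_substitute_chain chain pairs (substitute_chain chain pairs)

-- ===== LEMMAS AND PROOFS =====

-- the interleaving Source B's inner loop computes, as a recursive function on the part list
def Jf (t : String) : List (List Char) → List (String × Bool)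
  | [] => []
  | [p] => if p.isEmpty then [] else [(String.ofList p, false)]
  | p :: q :: ps =>
    (if p.isEmpty then [] else [(String.ofList p, false)]) ++ (t, true) :: Jf t (q :: ps)

theorem go_ne_nil (sep : List Char) (fuel : Nat) (l cur : List Char) (acc : List (List Char)) :
    PySem.Chars.splitOn.go sep fuel l cur acc ≠ [] := by
  induction fuel generalizing l cur acc with
  | zero => simp [PySem.Chars.splitOn.go]
  | succ f ih =>
    cases l with
    | nil => simp [PySem.Chars.splitOn.go]
    | cons c r =>
      rw [PySem.Chars.splitOn.go]
      split_ifs <;> apply ih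

theorem splitOn_ne_nil (l sep : List Char) : PySem.Chars.splitOn l sep ≠ [] :=
  go_ne_nil sep (l.length + 1) l [] []

theorem go_acc (sep : List Char) (fuel : Nat) (l cur : List Char) (acc : List (List Char)) :
    PySem.Chars.splitOn.go sep fuel l cur acc
      = acc.reverse ++ PySem.Chars.splitOn.go sep fuel l cur [] := by
  induction fuel generalizing l cur acc with
  | zero => simp [PySem.Chars.splitOn.go]
  | succ f ih =>
    cases l with
    | nil => simp [PySem.Chars.splitOn.go]
    | cons c r =>
      conv_lhs => rw [PySem.Chars.splitOn.go]
      conv_rhs => rw [PySem.Chars.splitOn.go]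
      split_ifs with hp
      · rw [ih _ _ (cur.reverse :: acc), ih _ _ [cur.reverse]]
        simp
      · exact ih _ _ acc

theorem go_fuel (sep : List Char) (hsep : sep ≠ []) (f1 : Nat) (l : List Char) (h1 : l.length < f1)
    (f2 : Nat) (cur : List Char) (acc : List (List Char)) (h2 : l.length < f2) :
    PySem.Chars.splitOn.go sep f1 l cur acc = PySem.Chars.splitOn.go sep f2 l cur acc := by
  induction f1 generalizing l f2 cur acc with
  | zero => omega
  | succ g ih =>
    cases l with
    | nil =>
      obtain ⟨h, rfl⟩ : ∃ h, f2 = h + 1 := ⟨f2 - 1, by omega⟩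
      simp [PySem.Chars.splitOn.go]
    | cons c r =>
      obtain ⟨h, rfl⟩ : ∃ h, f2 = h + 1 := ⟨f2 - 1, by omega⟩
      conv_lhs => rw [PySem.Chars.splitOn.go]
      conv_rhs => rw [PySem.Chars.splitOn.go]
      have hsl : 1 ≤ sep.length := by cases sep with | nil => exact absurd rfl hsep | cons a b => simp
      split_ifs with hp
      · exact ih _ (by simp at h1 ⊢; omega) _ _ _ (by simp at h2 ⊢; omega)
      · exact ih _ (by simp at h1 ⊢; omega) _ _ _ (by simp at h2 ⊢; omega)

theorem go_no_occ (sep : List Char) (fuel : Nat) (l cur : List Char) (acc : List (List Char))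
    (hf : l.length < fuel) (h : ¬ sep <:+: l) :
    PySem.Chars.splitOn.go sep fuel l cur acc = acc.reverse ++ [cur.reverse ++ l] := by
  induction fuel generalizing l cur acc with
  | zero => omega
  | succ f ih =>
    cases l with
    | nil => simp [PySem.Chars.splitOn.go]
    | cons c r =>
      rw [PySem.Chars.splitOn.go]
      have hp : sep.isPrefixOf (c :: r) = false := by
        rw [Bool.eq_false_iff]
        intro hpf
        exact h (List.isPrefixOf_iff_prefix.mp hpf).isInfix
      rw [if_neg (by simp [hp])]
      rw [ih r (c :: cur) acc (by simp at hf ⊢; omega)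
        (fun hinf => h (hinf.trans (List.suffix_cons c r).isInfix))]
      simp

theorem go_first_occ (sep : List Char) (hsep : sep ≠ []) (i : Nat) :
    ∀ (l cur : List Char) (acc : List (List Char)) (fuel : Nat),
      sep <+: l.drop i → (∀ j < i, ¬ sep <+: l.drop j) → i < fuel →
      PySem.Chars.splitOn.go sep fuel l cur acc
        = PySem.Chars.splitOn.go sep (fuel - i - 1) (l.drop (i + sep.length)) []
            ((cur.reverse ++ l.take i) :: acc) := by
  induction i with
  | zero =>
    intro l cur acc fuel hocc _ hfuel
    obtain ⟨f, rfl⟩ : ∃ f, fuel = f + 1 := ⟨fuel - 1, by omega⟩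
    cases l with
    | nil =>
      simp only [List.drop_nil] at hocc
      exact absurd (List.prefix_nil.mp hocc) hsep
    | cons c r =>
      rw [PySem.Chars.splitOn.go]
      rw [if_pos (List.isPrefixOf_iff_prefix.mpr (by simpa using hocc))]
      simp
  | succ i ih =>
    intro l cur acc fuel hocc hmin hfuel
    obtain ⟨f, rfl⟩ : ∃ f, fuel = f + 1 := ⟨fuel - 1, by omega⟩
    cases l with
    | nil =>
      simp only [List.drop_nil] at hocc
      exact absurd (List.prefix_nil.mp hocc) hsep
    | cons c r =>
      rw [PySem.Chars.splitOn.go]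
      have hp : sep.isPrefixOf (c :: r) = false := by
        rw [Bool.eq_false_iff]
        intro hpf
        exact hmin 0 (by omega) (by simpa using List.isPrefixOf_iff_prefix.mp hpf)
      rw [if_neg (by simp [hp])]
      rw [ih r (c :: cur) acc f (by simpa using hocc)
        (fun j hj => by simpa using hmin (j + 1) (by omega)) (by omega)]
      have e1 : (c :: cur).reverse ++ r.take i = cur.reverse ++ (c :: r).take (i + 1) := by simp
      have e2 : r.drop (i + sep.length) = (c :: r).drop (i + 1 + sep.length) := by
        have : i + 1 + sep.length = (i + sep.length) + 1 := by omega
        rw [this]; simp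
      have e3 : f - i - 1 = f + 1 - (i + 1) - 1 := by omega
      rw [e1, e2, e3]

theorem splitOn_no_occ (l sep : List Char) (h : ¬ sep <:+: l) :
    PySem.Chars.splitOn l sep = [l] := by
  unfold PySem.Chars.splitOn
  rw [go_no_occ sep (l.length + 1) l [] [] (by omega) h]
  simp

theorem splitOn_occ (l sep : List Char) (hsep : sep ≠ []) (hnn : 0 ≤ PySem.Chars.find l sep) :
    PySem.Chars.splitOn l sep
      = l.take (PySem.Chars.find l sep).toNat
        :: PySem.Chars.splitOn (l.drop ((PySem.Chars.find l sep).toNat + sep.length)) sep := by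
  have hne : PySem.Chars.find l sep ≠ -1 := by omega
  obtain ⟨hpre, hmin⟩ := PySem.Chars.find_spec (s := l) (sub := sep) hnn
  set n := (PySem.Chars.find l sep).toNat with hn
  have hle : n ≤ l.length := by
    have := PySem.Chars.find_le_length (s := l) (sub := sep)
    omega
  have hsl : 1 ≤ sep.length := by cases sep with | nil => exact absurd rfl hsep | cons a b => simp
  have hbound : n + sep.length ≤ l.length := by
    have := hpre.length_le
    simp at this
    omega
  unfold PySem.Chars.splitOn
  rw [go_first_occ sep hsep n l [] [] (l.length + 1) hpre hmin (by omega)]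
  rw [go_acc]
  rw [go_fuel sep hsep _ _ (by simp; omega) ((l.drop (n + sep.length)).length + 1) _ _ (by omega)]
  simp

-- Source B's interleaving loop over parts[:-1] plus the final parts[-1] append equals Jf
theorem inner_eq (t : String) (parts : List (List Char)) (hp : parts ≠ [])
    (nc : List (String × Bool)) :
    (match parts.getLast? with
     | some last =>
        if last.isEmpty then
          parts.dropLast.foldl
            (fun nc part => (if part.isEmpty then nc else nc ++ [(String.ofList part, false)]) ++ [(t, true)]) nc
        else
          parts.dropLast.foldl
            (fun nc part => (if part.isEmpty then nc else nc ++ [(String.ofList part, false)]) ++ [(t, true)]) nc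
          ++ [(String.ofList last, false)]
     | none =>
        parts.dropLast.foldl
          (fun nc part => (if part.isEmpty then nc else nc ++ [(String.ofList part, false)]) ++ [(t, true)]) nc)
      = nc ++ Jf t parts := by
  induction parts generalizing nc with
  | nil => exact absurd rfl hp
  | cons p rest ih =>
    cases rest with
    | nil =>
      simp only [List.getLast?_singleton, Jf]
      have : ([p] : List (List Char)).dropLast = [] := by simp
      rw [this]
      split_ifs <;> simp
    | cons q ps =>
      have hgl : (p :: q :: ps).getLast? = (q :: ps).getLast? := by
        simp [List.getLast?_cons_cons]
      have hdl : (p :: q :: ps).dropLast = p :: (q :: ps).dropLast := rfl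
      rw [hgl, hdl]
      simp only [List.foldl_cons]
      rw [ih (by simp)]
      simp only [Jf]
      split_ifs <;> simp

-- the heart: A's find-driven scanning loop produces exactly the split-and-interleave value
theorem subLoopA_eq_Jf (s tc : List Char) (hs : s ≠ []) :
    ∀ (fuel : Nat) (v : List Char), v.length < fuel →
      subLoopA s tc v fuel = Jf (String.ofList tc) (PySem.Chars.splitOn v s) := by
  intro fuel
  induction fuel with
  | zero => intro v hv; omega
  | succ f ih =>
    intro v hv
    by_cases hvnil : v = []
    · subst hvnil
      rw [subLoopA, if_pos rfl, splitOn_no_occ _ _ (by simp [List.infix_nil]; exact hs)]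
      simp [Jf]
    · rw [subLoopA, if_neg hvnil]
      simp only
      by_cases hneg : PySem.Chars.find v s < 0
      · have hm1 : PySem.Chars.find v s = -1 := by
          have := PySem.Chars.neg_one_le_find (s := v) (sub := s)
          omega
        rw [if_pos hneg, splitOn_no_occ _ _ ((PySem.Chars.find_eq_neg_one_iff v s).mp hm1)]
        simp [Jf, hvnil]
      · rw [not_lt] at hneg
        rw [if_neg (by omega)]
        have hsl : 1 ≤ s.length := by cases s with | nil => exact absurd rfl hs | cons a b => simp
        have hvl : 1 ≤ v.length := by cases v with | nil => exact absurd rfl hvnil | cons a b => simp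
        have hle : (PySem.Chars.find v s).toNat ≤ v.length := by
          have := PySem.Chars.find_le_length v s
          omega
        rw [splitOn_occ v s hs hneg]
        obtain ⟨q, qs, hqs⟩ : ∃ q qs,
            PySem.Chars.splitOn (v.drop ((PySem.Chars.find v s).toNat + s.length)) s = q :: qs := by
          cases hsp : PySem.Chars.splitOn (v.drop ((PySem.Chars.find v s).toNat + s.length)) s with
          | nil => exact absurd hsp (splitOn_ne_nil _ _)
          | cons q qs => exact ⟨q, qs, rfl⟩
        rw [hqs]
        simp only [Jf]
        have hslice1 : PySem.List.slice v none (some (PySem.Chars.find v s))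
            = v.take (PySem.Chars.find v s).toNat := PySem.List.slice_to v hneg
        have hslice2 : PySem.List.slice v (some (PySem.Chars.find v s + s.length)) none
            = v.drop ((PySem.Chars.find v s).toNat + s.length) := by
          rw [PySem.List.slice_from v (by omega)]
          congr 1
          omega
        rw [hslice1, hslice2, ih _ (by simp; omega), hqs]
        by_cases hpos : PySem.Chars.find v s > 0
        · rw [if_pos hpos,
            if_neg (by simp [List.isEmpty_iff, List.take_eq_nil_iff, hvnil]; omega)]
          simp
        · rw [if_neg hpos,
            if_pos (by simp [List.isEmpty_iff, List.take_eq_nil_iff]; omega)]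
          simp

theorem str_ne_empty_toList {s : String} (h : s ≠ "") : s.toList ≠ [] := by
  intro hl
  apply h
  have := congrArg String.ofList hl
  simpa [String.ofList_toList] using this

-- one pair, one pass: A's rebuilt newchain equals B's rebuilt newchain
theorem step_eq (p : String × String) (hp : p.1 ≠ "") (chain : List (String × Bool)) :
    chain.foldl (fun acc link => if !link.2 then acc ++ substituteA link.1 p else acc ++ [link]) []
      = chain.foldl (fun newchain link =>
          if link.2 then newchain ++ [link]
          else
            let parts := PySem.Chars.splitOn link.1.toList p.1.toList
            let newchain := parts.dropLast.foldl
              (fun nc part => (if part.isEmpty then nc else nc ++ [(String.ofList part, false)]) ++ [(p.2, true)]) newchain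
            match parts.getLast? with
            | some last => if last.isEmpty then newchain else newchain ++ [(String.ofList last, false)]
            | none => newchain) [] := by
  have hfun : (fun (acc : List (String × Bool)) (link : String × Bool) =>
      if !link.2 then acc ++ substituteA link.1 p else acc ++ [link])
      = (fun (newchain : List (String × Bool)) (link : String × Bool) =>
          if link.2 then newchain ++ [link]
          else
            let parts := PySem.Chars.splitOn link.1.toList p.1.toList
            let newchain := parts.dropLast.foldl
              (fun nc part => (if part.isEmpty then nc else nc ++ [(String.ofList part, false)]) ++ [(p.2, true)]) newchain
            match parts.getLast? with
            | some last => if last.isEmpty then newchain else newchain ++ [(String.ofList last, false)]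
            | none => newchain) := by
    funext acc link
    cases hm : link.2 with
    | true => simp
    | false =>
      simp only [Bool.not_false, ite_true]
      rw [inner_eq p.2 _ (splitOn_ne_nil _ _) acc]
      unfold substituteA
      rw [subLoopA_eq_Jf p.1.toList p.2.toList (str_ne_empty_toList hp) _ link.1.toList (by omega)]
      rw [String.ofList_toList]
      simp
  rw [hfun]

theorem main_eq (pairs : List (String × String)) (chain : List (String × Bool))
    (hpre : ∀ p ∈ pairs, p.1 ≠ "") :
    substitute_chain chain pairs = substitute_chain_alt chain pairs := by
  induction pairs generalizing chain with
  | nil => rfl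
  | cons p rest ih =>
    rw [substitute_chain]
    rw [ih _ (fun q hq => hpre q (List.mem_cons_of_mem p hq))]
    unfold substitute_chain_alt
    rw [List.foldl_cons]
    rw [step_eq p (hpre p (List.mem_cons_self)) chain]

-- a chain whose links are all modified passes through A unchanged
theorem allmod_A (pairs : List (String × String)) (chain : List (String × Bool))
    (h : ∀ l ∈ chain, l.2 = true) : substitute_chain chain pairs = chain := by
  induction pairs generalizing chain with
  | nil => rfl
  | cons p rest ih =>
    rw [substitute_chain]
    have hstep : chain.foldl
        (fun acc link => if !link.2 then acc ++ substituteA link.1 p else acc ++ [link]) []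
        = chain := by
      rw [PySem.List.foldl_congr_mem chain _ (fun acc x => acc ++ [x]) []
        (fun acc x hx => by simp [h x hx])]
      rw [PySem.List.foldl_append_singleton]
      simp
    rw [hstep, ih chain h]

-- and through B unchanged
theorem allmod_B (pairs : List (String × String)) (chain : List (String × Bool))
    (h : ∀ l ∈ chain, l.2 = true) : substitute_chain_alt chain pairs = chain := by
  unfold substitute_chain_alt
  induction pairs with
  | nil => rfl
  | cons p rest ih =>
    rw [List.foldl_cons]
    have hstep : chain.foldl (fun newchain link =>
        if link.2 then newchain ++ [link]
        else
          let parts := PySem.Chars.splitOn link.1.toList p.1.toList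
          let newchain := parts.dropLast.foldl
            (fun nc part => (if part.isEmpty then nc else nc ++ [(String.ofList part, false)]) ++ [(p.2, true)]) newchain
          match parts.getLast? with
          | some last => if last.isEmpty then newchain else newchain ++ [(String.ofList last, false)]
          | none => newchain) []
        = chain := by
      rw [PySem.List.foldl_congr_mem chain _ (fun acc x => acc ++ [x]) []
        (fun acc x hx => by simp [h x hx])]
      rw [PySem.List.foldl_append_singleton]
      simp
    rw [hstep]
    exact ih

-- ===== VERDICT (by name: the statement is the Claim_ definition above) =====
theorem substitute_chain_spec : Claim_equal_substitute_chain := by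
  intro chain pairs _ hpre
  unfold Spec_substitute_chain
  cases hpre with
  | inl hp => exact main_eq pairs chain hp
  | inr hm => rw [allmod_A pairs chain hm, allmod_B pairs chain hm]
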